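-- pv_equiv track=rewrite | github.com/wzuniga/CursoSistemasInteligentesUCSP | Semana 9/variableEliminar.py | containsElim
-- ===== SOURCE A (Python) =====
-- def containsElim(old, cond):
--     for key in cond["condition"]:
--         if key in old["condition"]:
--             if old["condition"][key] != cond["condition"][key]:
--                 return False
--         else:
--             return False
--     return True
-- ===== SOURCE B (Python) =====
-- def containsElim(old, cond):
--     o = old["condition"]
--     return {**o, **cond["condition"]} == o
-- ===== Notes on version B (the rewrite author's own statement) =====
-- stated objective: alternative
-- what changed: Instead of scanning cond's keys with per-key lookups and early returns, B builds the merged dict {**old_cond, **cond_cond} and returns whether merging changed nothing (whole-dict equality), i.e. cond's condition is already absorbed by old's.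
-- outside the precondition, e.g. on containsElim({}, {'condition': {}}): A returns True, B raises KeyError
import Mathlib
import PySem

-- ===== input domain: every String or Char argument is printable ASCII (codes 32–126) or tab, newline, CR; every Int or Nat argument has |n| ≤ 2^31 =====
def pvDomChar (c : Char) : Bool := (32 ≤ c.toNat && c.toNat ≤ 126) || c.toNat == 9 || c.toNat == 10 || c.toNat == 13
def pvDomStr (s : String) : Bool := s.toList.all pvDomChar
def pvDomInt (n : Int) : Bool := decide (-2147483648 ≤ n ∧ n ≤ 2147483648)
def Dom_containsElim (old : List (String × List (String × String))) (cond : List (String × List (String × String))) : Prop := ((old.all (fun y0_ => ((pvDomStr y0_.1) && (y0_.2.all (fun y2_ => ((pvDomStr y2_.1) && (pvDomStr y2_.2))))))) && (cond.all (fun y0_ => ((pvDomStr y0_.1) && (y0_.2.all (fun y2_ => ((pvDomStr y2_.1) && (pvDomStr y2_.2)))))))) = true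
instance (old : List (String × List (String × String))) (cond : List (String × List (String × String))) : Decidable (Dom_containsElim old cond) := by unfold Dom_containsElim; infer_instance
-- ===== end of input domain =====

-- ===== PORT A =====
-- B replaces A's per-key subset scan by merge-and-compare: {**old_cond, **cond_cond} == old_cond (alternative); return value only.

-- A's 'for key in cond["condition"]: …' with its two early returns, as structural recursion over the key list
def containsElimLoop (ocd ccd : PySem.Dict String String) : List String → Bool
  | [] => true
  | k :: ks =>
    if ocd.contains k then
      if ocd.getD k "" != ccd.getD k "" then false
      else containsElimLoop ocd ccd ks
    else false

def containsElim (old : List (String × List (String × String))) (cond : List (String × List (String × String))) : Bool :=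
  let ocd := PySem.Dict.ofList ((PySem.Dict.ofList old).getD "condition" [])
  let ccd := PySem.Dict.ofList ((PySem.Dict.ofList cond).getD "condition" [])
  containsElimLoop ocd ccd ccd.keys

-- ===== PORT B =====
-- Source B: {**o, **cond["condition"]} == o.  The merge {**o, **c} is o updated by inserting each item of c
-- in order.  Python's dict == is order-insensitive, but a dict built from o by insert-overwrites equals o
-- as a mapping iff it equals o as an item list (insert keeps positions, new keys append), so structural
-- equality is exact here.
def containsElim_alt (old : List (String × List (String × String))) (cond : List (String × List (String × String))) : Bool :=
  let ocd := PySem.Dict.ofList ((PySem.Dict.ofList old).getD "condition" [])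
  let ccd := PySem.Dict.ofList ((PySem.Dict.ofList cond).getD "condition" [])
  let merged := ccd.items.foldl (fun d p => d.insert p.1 p.2) ocd
  decide (merged = ocd)

-- ===== PRECONDITION & SPEC =====
-- Pre_ excludes inputs where a dict lacks the key "condition": there A usually raises KeyError, except that
-- when cond's "condition" dict is empty A's loop never touches old and returns True, while B's eager
-- old["condition"] lookup raises — an accident of A's lazy evaluation that B does not reproduce.
def Pre_containsElim (old : List (String × List (String × String))) (cond : List (String × List (String × String))) : Prop :=
  (PySem.Dict.ofList old).contains "condition" = true ∧ (PySem.Dict.ofList cond).contains "condition" = true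
instance (old : List (String × List (String × String))) (cond : List (String × List (String × String))) : Decidable (Pre_containsElim old cond) := by unfold Pre_containsElim; infer_instance
def pvWitness_containsElim : (List (String × List (String × String))) × (List (String × List (String × String))) :=
  ([("condition", [("a", "x")])], [("condition", [("a", "x")])])
def Spec_containsElim (old : List (String × List (String × String))) (cond : List (String × List (String × String))) (out : Bool) : Prop := out = containsElim_alt old cond
instance (old : List (String × List (String × String))) (cond : List (String × List (String × String))) (out : Bool) : Decidable (Spec_containsElim old cond out) := by unfold Spec_containsElim; infer_instance

-- ===== CLAIM (what is proved, stated in full; the proofs are below) =====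
def Claim_equal_containsElim : Prop := ∀ (old : List (String × List (String × String))) (cond : List (String × List (String × String))), Dom_containsElim old cond → Pre_containsElim old cond → Spec_containsElim old cond (containsElim old cond)

-- ===== LEMMAS AND PROOFS =====

-- A's loop is the Boolean 'all keys pass' predicate
theorem loop_eq_all (ocd ccd : PySem.Dict String String) (ks : List String) :
    containsElimLoop ocd ccd ks = ks.all (fun k => ocd.contains k && (ocd.getD k "" == ccd.getD k "")) := by
  induction ks with
  | nil => rfl
  | cons k ks ih =>
    simp only [containsElimLoop, List.all_cons]
    by_cases hc : ocd.contains k = true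
    · by_cases he : ocd.getD k "" = ccd.getD k ""
      · simp [hc, he, ih]
      · simp [hc, he]
    · simp [Bool.eq_false_iff.mpr hc]

-- inserting a pair the dict already holds changes nothing
theorem insert_self_of_get? (d : PySem.Dict String String) (hnd : d.keys.Nodup)
    (k : String) (v : String) (h : d.get? k = some v) : d.insert k v = d := by
  have hc : d.contains k = true := by
    rw [PySem.Dict.contains_eq_isSome_get?, h]; rfl
  show PySem.Dict.insert d k v = d
  rw [PySem.Dict.insert, if_pos hc]
  cases d with
  | mk items =>
    congr 1
    have : ∀ p ∈ items, (if (p.1 == k) = true then (k, v) else p) = p := by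
      intro p hp
      by_cases hpk : p.1 = k
      · have hget : PySem.Dict.get? ⟨items⟩ p.1 = some p.2 :=
          PySem.Dict.get?_of_mem_items _ (by exact hp) hnd
        rw [hpk, h] at hget
        have hv : v = p.2 := Option.some_inj.mp hget
        rw [hpk, hv, ← hpk]
        simp
      · simp [hpk]
    simpa using List.map_congr_left this

-- folding inserts of pairs the dict already holds changes nothing
theorem foldl_insert_eq_self (d : PySem.Dict String String) (hnd : d.keys.Nodup)
    (ps : List (String × String)) (h : ∀ p ∈ ps, d.get? p.1 = some p.2) :
    ps.foldl (fun d p => d.insert p.1 p.2) d = d := by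
  induction ps with
  | nil => rfl
  | cons p ps ih =>
    simp only [List.foldl_cons,
      insert_self_of_get? d hnd p.1 p.2 (h p (List.mem_cons_self))]
    exact ih (fun q hq => h q (List.mem_cons_of_mem p hq))

-- lookup of a key none of the inserted pairs carries is unchanged
theorem get?_foldl_insert_of_not_mem (ps : List (String × String))
    (d : PySem.Dict String String) (k : String) (h : k ∉ ps.map Prod.fst) :
    (ps.foldl (fun d p => d.insert p.1 p.2) d).get? k = d.get? k := by
  induction ps generalizing d with
  | nil => rfl
  | cons p ps ih =>
    simp only [List.map_cons, List.mem_cons, not_or] at h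
    simp only [List.foldl_cons]
    rw [ih _ h.2, PySem.Dict.get?_insert_of_ne _ _ h.1]

-- lookup after folding inserts of a nodup-keyed pair list finds that pair's value
theorem get?_foldl_insert_mem (ps : List (String × String))
    (hnd : (ps.map Prod.fst).Nodup) (d : PySem.Dict String String)
    (k : String) (v : String) (h : (k, v) ∈ ps) :
    (ps.foldl (fun d p => d.insert p.1 p.2) d).get? k = some v := by
  induction ps generalizing d with
  | nil => cases h
  | cons p ps ih =>
    simp only [List.map_cons, List.nodup_cons] at hnd
    simp only [List.foldl_cons]
    rcases List.mem_cons.mp h with heq | hmem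
    · subst heq
      rw [get?_foldl_insert_of_not_mem _ _ _ hnd.1, PySem.Dict.get?_insert_self]
    · exact ih hnd.2 _ hmem

-- the crux: merged-equals-old iff every key of cond's dict passes A's per-key test
theorem merged_eq_iff (ocd ccd : PySem.Dict String String)
    (hndo : ocd.keys.Nodup) (hndc : ccd.keys.Nodup) :
    ccd.items.foldl (fun d p => d.insert p.1 p.2) ocd = ocd ↔
      ∀ k ∈ ccd.keys, ocd.contains k = true ∧ ocd.getD k "" = ccd.getD k "" := by
  have hkeys : ccd.items.map Prod.fst = ccd.keys := rfl
  constructor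
  · intro hm k hk
    have hitem : (k, ccd.getD k "") ∈ ccd.items := by
      rw [PySem.Dict.items_eq_map_keys ccd hndc ""]
      exact List.mem_map.mpr ⟨k, hk, rfl⟩
    have hget : ocd.get? k = some (ccd.getD k "") := by
      rw [← hm]
      exact get?_foldl_insert_mem _ (hkeys ▸ hndc) _ _ _ hitem
    refine ⟨by rw [PySem.Dict.contains_eq_isSome_get?, hget]; rfl, ?_⟩
    rw [PySem.Dict.getD_eq_get?_getD, PySem.Dict.getD_eq_get?_getD, hget]
    have : (ccd.get? k).isSome = true := by
      rw [← PySem.Dict.contains_eq_isSome_get?]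
      exact (PySem.Dict.contains_iff_mem_keys ccd k).mpr hk
    rcases Option.isSome_iff_exists.mp this with ⟨w, hw⟩
    simp [PySem.Dict.getD_eq_get?_getD, hw]
  · intro hall
    refine foldl_insert_eq_self ocd hndo _ ?_
    intro p hp
    have hk : p.1 ∈ ccd.keys := PySem.Dict.mem_keys_of_mem_items _ hp
    obtain ⟨hc, he⟩ := hall p.1 hk
    have hcg : ccd.get? p.1 = some p.2 := PySem.Dict.get?_of_mem_items _ hp hndc
    have : (ocd.get? p.1).isSome = true := by rwa [← PySem.Dict.contains_eq_isSome_get?]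
    rcases Option.isSome_iff_exists.mp this with ⟨w, hw⟩
    have : w = p.2 := by
      have h1 : ocd.getD p.1 "" = w := by simp [PySem.Dict.getD_eq_get?_getD, hw]
      have h2 : ccd.getD p.1 "" = p.2 := by simp [PySem.Dict.getD_eq_get?_getD, hcg]
      rw [h1, h2] at he; exact he
    rw [hw, this]

theorem containsElim_spec : Claim_equal_containsElim := by
  intro old cond _ _
  show containsElim old cond = containsElim_alt old cond
  unfold containsElim containsElim_alt
  rw [loop_eq_all, Bool.eq_iff_iff]
  rw [List.all_eq_true, decide_eq_true_iff]
  rw [merged_eq_iff _ _ (PySem.Dict.nodup_keys_ofList _) (PySem.Dict.nodup_keys_ofList _)]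
  constructor
  · intro h k hk
    have := h k hk
    simp only [Bool.and_eq_true, beq_iff_eq] at this
    exact this
  · intro h k hk
    obtain ⟨hc, he⟩ := h k hk
    simp [hc, he]
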